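-- pv_equiv track=rewrite | github.com/mrmandarin2002/Pong-AI-with-Mini-Max | Gomoku/alex_gomoku.py | detect_row_for_win
-- ===== SOURCE A (Python) =====
-- def detect_row_for_win(board, color, y_start, x_start, length, d_y, d_x):
--     count = 0
--
--     num_col_pieces = 0
--     counter = 0
--
--     right_coor_y = y_start + d_y * counter  ###COME BACK TO HERE DOES COUNTER ALWAYS EQUAL ZERO??
--     right_coor_x = x_start + d_x * counter
--     while 8 > right_coor_y > -1 and 8 > right_coor_x > -1:
--         TorF = True
--         if board[right_coor_y][right_coor_x] == color:
--             num_col_pieces += 1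
--         if counter >= length - 1:
--             left_coor_y = right_coor_y - (d_y * (length - 1))
--             left_coor_x = right_coor_x - (d_x * (length - 1))
--
--             y_check1 = right_coor_y + d_y
--             x_check1 = right_coor_x + d_x
--             y_check2 = left_coor_y - d_y
--             x_check2 = left_coor_x - d_x
--
--             if 8 > y_check2 >= 0 and 8 > x_check2 >= 0 and board[y_check2][x_check2] == color:
--                 TorF = False
--             if 8 > y_check1 >= 0 and 8 > x_check1 >= 0 and board[y_check1][x_check1] == color:
--                 TorF = False
--
--             if num_col_pieces == length:
--                 if TorF:
--                     return 1
--
--             if board[left_coor_y][left_coor_x] == color: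
--                 num_col_pieces = num_col_pieces - 1
--
--         counter += 1
--         right_coor_y = y_start + d_y * counter
--         right_coor_x = x_start + d_x * counter
--
--     return 0
-- ===== SOURCE B (Python) =====
-- def detect_row_for_win(board, color, y_start, x_start, length, d_y, d_x):
--     # Collect the ray's cells once, then test each length-window of the list
--     # directly (all-equal + both neighbours not color) instead of maintaining
--     # A's sliding piece count.
--     if length < 1:
--         return 0
--     cells = []
--     counter = 0
--     y, x = y_start, x_start
--     while 8 > y > -1 and 8 > x > -1:
--         cells.append(board[y][x])
--         counter += 1
--         y = y_start + d_y * counter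
--         x = x_start + d_x * counter
--     if not cells:
--         return 0
--     py, px = y_start - d_y, x_start - d_x
--     prev_color = 8 > py > -1 and 8 > px > -1 and board[py][px] == color
--     n = len(cells)
--     for i in range(n - length + 1):
--         if all(c == color for c in cells[i:i + length]):
--             left_ok = (cells[i - 1] != color) if i > 0 else (not prev_color)
--             right_ok = (i + length >= n) or (cells[i + length] != color)
--             if left_ok and right_ok:
--                 return 1
--     return 0
-- ===== Notes on version B (the rewrite author's own statement) =====
-- stated objective: alternative
-- what changed: A maintains a sliding count of pieces updated incrementally along the walk; B first collects the ray's cells into a list and then tests each length-window of that list directly (all cells equal color, both neighbours not color), with no incremental counter.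
-- outside the precondition, e.g. on detect_row_for_win([[0, 0, 0, 0, 0, 0, 0, 0]], 1, 0, 0, 0, 0, 1): A returns 1, B returns 0; on detect_row_for_win([[5, 3]], 5, 0, 0, 1, 0, -1): A returns 1, B returns 1
import Mathlib
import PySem

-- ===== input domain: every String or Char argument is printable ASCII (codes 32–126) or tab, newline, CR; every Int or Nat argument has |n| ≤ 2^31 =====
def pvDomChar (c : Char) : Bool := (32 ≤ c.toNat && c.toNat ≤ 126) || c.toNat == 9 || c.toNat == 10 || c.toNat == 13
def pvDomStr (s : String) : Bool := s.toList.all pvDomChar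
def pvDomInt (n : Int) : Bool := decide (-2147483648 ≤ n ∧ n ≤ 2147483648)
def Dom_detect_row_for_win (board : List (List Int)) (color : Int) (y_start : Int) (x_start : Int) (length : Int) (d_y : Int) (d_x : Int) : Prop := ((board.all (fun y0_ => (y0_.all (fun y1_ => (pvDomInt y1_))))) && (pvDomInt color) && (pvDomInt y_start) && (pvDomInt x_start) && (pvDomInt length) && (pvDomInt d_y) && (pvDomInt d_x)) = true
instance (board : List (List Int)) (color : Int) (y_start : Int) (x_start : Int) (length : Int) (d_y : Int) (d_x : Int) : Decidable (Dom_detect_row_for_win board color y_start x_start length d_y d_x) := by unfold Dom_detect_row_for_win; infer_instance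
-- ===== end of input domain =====

-- B replaces A's incrementally maintained sliding piece count by collecting the ray's
-- cells into a list once and testing each length-window of that list directly (alternative
-- decomposition, no speed claim).

-- ===== PORT A =====
-- `8 > y > -1 and 8 > x > -1` on ints
def pvInBox (y x : Int) : Bool := decide (8 > y) && decide (y > -1) && decide (8 > x) && decide (x > -1)

-- board[y][x]; total with defaults — exact wherever 0 ≤ y,x < 8 and the board covers the
-- 8×8 box, which Pre_ guarantees for every access either port performs
def pvBGet (board : List (List Int)) (y x : Int) : Int :=
  PySem.List.pyGetD (PySem.List.pyGetD board y []) x 0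

-- A's while loop; fuel-based (inside Pre_ the walk leaves the 8×8 box within 16 steps,
-- so fuel 17 is never exhausted there)
def pvALoop (board : List (List Int)) (color y0 x0 length dy dx : Int) :
    Nat → Int → Int → Int
  | 0, _, _ => 0
  | fuel + 1, counter, num =>
    let ry := y0 + dy * counter
    let rx := x0 + dx * counter
    if pvInBox ry rx then
      let num1 := if pvBGet board ry rx == color then num + 1 else num
      if counter ≥ length - 1 then
        let ly := ry - dy * (length - 1)
        let lx := rx - dx * (length - 1)
        let yc1 := ry + dy
        let xc1 := rx + dx
        let yc2 := ly - dy
        let xc2 := lx - dx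
        let torf := !((pvInBox yc2 xc2 && (pvBGet board yc2 xc2 == color)) ||
                      (pvInBox yc1 xc1 && (pvBGet board yc1 xc1 == color)))
        if num1 == length && torf then 1
        else
          let num2 := if pvBGet board ly lx == color then num1 - 1 else num1
          pvALoop board color y0 x0 length dy dx fuel (counter + 1) num2
      else pvALoop board color y0 x0 length dy dx fuel (counter + 1) num1
    else 0

def detect_row_for_win (board : List (List Int)) (color : Int) (y_start : Int) (x_start : Int) (length : Int) (d_y : Int) (d_x : Int) : Int :=
  pvALoop board color y_start x_start length d_y d_x 17 0 0

-- ===== PORT B =====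
-- B's collecting while loop (same stepping as A's loop; same fuel remark)
def pvCollect (board : List (List Int)) (y0 x0 dy dx : Int) : Nat → Int → List Int
  | 0, _ => []
  | fuel + 1, counter =>
    let y := y0 + dy * counter
    let x := x0 + dx * counter
    if pvInBox y x then
      pvBGet board y x :: pvCollect board y0 x0 dy dx fuel (counter + 1)
    else []

-- B's `for i in range(n - length + 1)` window scan (return-1-inside-loop as `any`)
def pvBFind (cells : List Int) (prevColor : Bool) (n color length : Int) : Bool :=
  (PySem.List.pyRange 0 (n - length + 1) 1).any (fun i =>
    (PySem.List.slice cells (some i) (some (i + length))).all (fun c => c == color)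
    && (if 0 < i then !(PySem.List.pyGetD cells (i - 1) 0 == color) else !prevColor)
    && (decide (n ≤ i + length) || !(PySem.List.pyGetD cells (i + length) 0 == color)))

def detect_row_for_win_alt (board : List (List Int)) (color : Int) (y_start : Int) (x_start : Int) (length : Int) (d_y : Int) (d_x : Int) : Int :=
  if length < 1 then 0
  else
    let cells := pvCollect board y_start x_start d_y d_x 17 0
    if cells.isEmpty then 0
    else
    let prevColor := pvInBox (y_start - d_y) (x_start - d_x) &&
                     (pvBGet board (y_start - d_y) (x_start - d_x) == color)
    let n := PySem.List.len cells
    if pvBFind cells prevColor n color length then 1 else 0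

-- ===== PRECONDITION & SPEC =====
-- When the start lies inside the 8×8 box, Pre_ restricts to the natural domain of this
-- Gomoku scanner: an at-least-8×8 board, a genuine direction and a positive target length.
-- Outside it A loops forever (d_y=d_x=0), raises IndexError (board not covering the box,
-- or nonpositive length reaching past the visited ray), or — on nonpositive length —
-- wraps a negative index / returns an accidental length-0 "win".
def Pre_detect_row_for_win (board : List (List Int)) (color : Int) (y_start : Int) (x_start : Int) (length : Int) (d_y : Int) (d_x : Int) : Prop :=
  (-1 < y_start ∧ y_start < 8 ∧ -1 < x_start ∧ x_start < 8) →
    (1 ≤ length ∧ ¬(d_y = 0 ∧ d_x = 0) ∧ 8 ≤ board.length ∧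
      ∀ row ∈ board.take 8, 8 ≤ row.length)
instance (board : List (List Int)) (color : Int) (y_start : Int) (x_start : Int) (length : Int) (d_y : Int) (d_x : Int) : Decidable (Pre_detect_row_for_win board color y_start x_start length d_y d_x) := by unfold Pre_detect_row_for_win; infer_instance

def pvWitness_detect_row_for_win : List (List Int) × Int × Int × Int × Int × Int × Int :=
  (List.replicate 8 (List.replicate 8 0), 0, 0, 0, 1, 0, 1)

def Spec_detect_row_for_win (board : List (List Int)) (color : Int) (y_start : Int) (x_start : Int) (length : Int) (d_y : Int) (d_x : Int) (out : Int) : Prop := out = detect_row_for_win_alt board color y_start x_start length d_y d_x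
instance (board : List (List Int)) (color : Int) (y_start : Int) (x_start : Int) (length : Int) (d_y : Int) (d_x : Int) (out : Int) : Decidable (Spec_detect_row_for_win board color y_start x_start length d_y d_x out) := by unfold Spec_detect_row_for_win; infer_instance

-- ===== CLAIM (what is proved, stated in full; the proofs are below) =====
def Claim_equal_detect_row_for_win : Prop := ∀ (board : List (List Int)) (color : Int) (y_start : Int) (x_start : Int) (length : Int) (d_y : Int) (d_x : Int), Dom_detect_row_for_win board color y_start x_start length d_y d_x → Pre_detect_row_for_win board color y_start x_start length d_y d_x → Spec_detect_row_for_win board color y_start x_start length d_y d_x (detect_row_for_win board color y_start x_start length d_y d_x)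

-- ===== LEMMAS AND PROOFS =====

def pvCell (board : List (List Int)) (y0 x0 dy dx k : Int) : Int :=
  pvBGet board (y0 + dy * k) (x0 + dx * k)
def pvP (y0 x0 dy dx k : Int) : Bool := pvInBox (y0 + dy * k) (x0 + dx * k)
def pvWin (board : List (List Int)) (color y0 x0 L dy dx : Int) (a : Nat) : Bool :=
  ((List.range' a L.toNat).all (fun (j : Nat) => pvCell board y0 x0 dy dx (j : Int) == color))
  && !(pvP y0 x0 dy dx ((a : Int) - 1) && (pvCell board y0 x0 dy dx ((a : Int) - 1) == color))
  && !(pvP y0 x0 dy dx ((a : Int) + L) && (pvCell board y0 x0 dy dx ((a : Int) + L) == color))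


theorem pvALoop_eq (board : List (List Int)) (color y0 x0 L dy dx : Int) (hL : 1 ≤ L) :
    ∀ (f r k : Nat) (num : Int), r < f →
    (∀ j, j < r → pvP y0 x0 dy dx ((k + j : Nat) : Int) = true) →
    pvP y0 x0 dy dx ((k + r : Nat) : Int) = false →
    num = ((List.range' (k - min k (L - 1).toNat) (min k (L - 1).toNat)).countP
            (fun (j : Nat) => pvCell board y0 x0 dy dx (j : Int) == color) : Int) →
    pvALoop board color y0 x0 L dy dx f (k : Int) num
      = if (List.range' k r).any (fun e =>
            decide ((L - 1).toNat ≤ e) && pvWin board color y0 x0 L dy dx (e - (L - 1).toNat))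
        then 1 else 0 := by
  intro f
  induction f with
  | zero => intro r k num h; omega
  | succ f ih =>
    intro r k num hrf hrun hstop hnum
    have hLn : (((L - 1).toNat : Nat) : Int) = L - 1 := by omega
    set Ln := (L - 1).toNat with hLndef
    set p : Nat → Bool := (fun (j : Nat) => pvCell board y0 x0 dy dx (j : Int) == color) with hp
    match r with
    | 0 =>
      have h0 : pvInBox (y0 + dy * (k : Int)) (x0 + dx * (k : Int)) = false := by
        simpa [pvP] using hstop
      simp [pvALoop, h0]
    | r + 1 =>
      have hPk : pvInBox (y0 + dy * (k : Int)) (x0 + dx * (k : Int)) = true := by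
        simpa [pvP] using hrun 0 (by omega)
      have hrunS : ∀ j, j < r → pvP y0 x0 dy dx (((k + 1) + j : Nat) : Int) = true := by
        intro j hj
        have := hrun (j + 1) (by omega)
        simpa [Nat.add_assoc, Nat.add_comm 1 j] using this
      have hstopS : pvP y0 x0 dy dx (((k + 1) + r : Nat) : Int) = false := by
        have := hstop
        simpa [Nat.add_assoc, Nat.add_comm 1 r] using this
      simp only [pvALoop, hPk, if_true]
      rw [List.range'_succ, List.any_cons]
      by_cases hk : Ln ≤ k
      · have hcond : ((k : Int) ≥ L - 1) := by omega
        rw [if_pos hcond]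
        have ha : ((k - Ln : Nat) : Int) = (k : Int) - (L - 1) := by
          rw [Nat.cast_sub hk, hLn]
        have hmin : min k Ln = Ln := by omega
        have hWsplit : List.range' (k - Ln) (Ln + 1) = List.range' (k - Ln) Ln ++ [k] := by
          rw [List.range'_concat]
          congr 2
          omega
        have hnum1 : (if pvBGet board (y0 + dy * (k : Int)) (x0 + dx * (k : Int)) == color
              then num + 1 else num)
            = (((List.range' (k - Ln) (Ln + 1)).countP p : Nat) : Int) := by
          have hpk : p k = (pvBGet board (y0 + dy * (k : Int)) (x0 + dx * (k : Int)) == color) := by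
            simp [hp, pvCell]
          rw [hWsplit, List.countP_append]
          cases hc : pvBGet board (y0 + dy * (k : Int)) (x0 + dx * (k : Int)) == color <;>
            · rw [hnum]
              simp only [hmin, List.countP_cons, List.countP_nil, hpk, hc]
              push_cast
              omega
        have hcle : (List.range' (k - Ln) (Ln + 1)).countP p ≤ Ln + 1 := by
          simpa [List.length_range'] using
            List.countP_le_length (p := p) (l := List.range' (k - Ln) (Ln + 1))
        have hwin : ((if pvBGet board (y0 + dy * (k : Int)) (x0 + dx * (k : Int)) == color
              then num + 1 else num) == L)
            = (List.range' (k - Ln) (Ln + 1)).all p := by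
          rw [hnum1]
          cases hall : (List.range' (k - Ln) (Ln + 1)).all p
          · rw [List.all_eq_false] at hall
            obtain ⟨x, hx, hpx⟩ := hall
            have hne : (List.range' (k - Ln) (Ln + 1)).countP p ≠ Ln + 1 := by
              intro hcp
              exact hpx (List.countP_eq_length.mp
                (by simpa [List.length_range'] using hcp) x hx)
            simp only [beq_eq_false_iff_ne, ne_eq]
            omega
          · have hcp : (List.range' (k - Ln) (Ln + 1)).countP p = Ln + 1 := by
              have := List.countP_eq_length.mpr (List.all_eq_true.mp hall)
              simpa [List.length_range'] using this
            rw [hcp]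
            simp only [beq_iff_eq]
            omega
        have hLt : L.toNat = Ln + 1 := by omega
        have e2y : y0 + dy * (k : Int) - dy * (L - 1) - dy
            = y0 + dy * (((k - Ln : Nat) : Int) - 1) := by rw [ha]; ring
        have e2x : x0 + dx * (k : Int) - dx * (L - 1) - dx
            = x0 + dx * (((k - Ln : Nat) : Int) - 1) := by rw [ha]; ring
        have e1y : y0 + dy * (k : Int) + dy = y0 + dy * (((k - Ln : Nat) : Int) + L) := by
          rw [ha]; ring
        have e1x : x0 + dx * (k : Int) + dx = x0 + dx * (((k - Ln : Nat) : Int) + L) := by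
          rw [ha]; ring
        have hhead :
            (decide (Ln ≤ k) && pvWin board color y0 x0 L dy dx (k - Ln))
            = ((if pvBGet board (y0 + dy * (k : Int)) (x0 + dx * (k : Int)) == color
                  then num + 1 else num) == L
               && !((pvInBox (y0 + dy * (k : Int) - dy * (L - 1) - dy)
                        (x0 + dx * (k : Int) - dx * (L - 1) - dx)
                     && (pvBGet board (y0 + dy * (k : Int) - dy * (L - 1) - dy)
                          (x0 + dx * (k : Int) - dx * (L - 1) - dx) == color))
                   || (pvInBox (y0 + dy * (k : Int) + dy) (x0 + dx * (k : Int) + dx)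
                     && (pvBGet board (y0 + dy * (k : Int) + dy) (x0 + dx * (k : Int) + dx)
                        == color)))) := by
          rw [pvWin, hLt, ← hwin]
          simp only [pvP, pvCell, ← e2y, ← e2x, ← e1y, ← e1x, hk, decide_true,
            Bool.true_and, Bool.not_or, Bool.and_assoc]
        -- the left-cell decrement
        have e0y : y0 + dy * (k : Int) - dy * (L - 1) = y0 + dy * ((k - Ln : Nat) : Int) := by
          rw [ha]; ring
        have e0x : x0 + dx * (k : Int) - dx * (L - 1) = x0 + dx * ((k - Ln : Nat) : Int) := by
          rw [ha]; ring
        have hTsplit : List.range' (k - Ln) (Ln + 1) = (k - Ln) :: List.range' (k - Ln + 1) Ln :=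
          List.range'_succ ..
        have hpleft : p (k - Ln) = (pvBGet board (y0 + dy * (k : Int) - dy * (L - 1))
            (x0 + dx * (k : Int) - dx * (L - 1)) == color) := by
          simp [hp, pvCell, e0y, e0x]
        cases hC : ((if pvBGet board (y0 + dy * (k : Int)) (x0 + dx * (k : Int)) == color
              then num + 1 else num) == L
            && !((pvInBox (y0 + dy * (k : Int) - dy * (L - 1) - dy)
                     (x0 + dx * (k : Int) - dx * (L - 1) - dx)
                  && (pvBGet board (y0 + dy * (k : Int) - dy * (L - 1) - dy)
                       (x0 + dx * (k : Int) - dx * (L - 1) - dx) == color))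
                || (pvInBox (y0 + dy * (k : Int) + dy) (x0 + dx * (k : Int) + dx)
                  && (pvBGet board (y0 + dy * (k : Int) + dy) (x0 + dx * (k : Int) + dx)
                     == color))))
        · -- no win at this step: recurse
          have hh : (decide (Ln ≤ k) && pvWin board color y0 x0 L dy dx (k - Ln)) = false :=
            hhead.trans hC
          rw [if_neg (by simp), hh, Bool.false_or]
          have hnum2 : (if pvBGet board (y0 + dy * (k : Int) - dy * (L - 1))
                  (x0 + dx * (k : Int) - dx * (L - 1)) == color
                then (if pvBGet board (y0 + dy * (k : Int)) (x0 + dx * (k : Int)) == color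
                  then num + 1 else num) - 1
                else (if pvBGet board (y0 + dy * (k : Int)) (x0 + dx * (k : Int)) == color
                  then num + 1 else num))
              = (((List.range' (k + 1 - min (k + 1) Ln) (min (k + 1) Ln)).countP p : Nat) : Int) := by
            have hmin1 : min (k + 1) Ln = Ln := by omega
            have hlow : k + 1 - Ln = k - Ln + 1 := by omega
            rw [hmin1, hlow]
            cases hc : pvBGet board (y0 + dy * (k : Int) - dy * (L - 1))
                (x0 + dx * (k : Int) - dx * (L - 1)) == color <;>
              · rw [hnum1, hTsplit]
                simp only [List.countP_cons, hpleft, hc]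
                push_cast
                omega
          rw [hnum2]
          have := ih r (k + 1)
            (((List.range' (k + 1 - min (k + 1) Ln) (min (k + 1) Ln)).countP p : Nat) : Int)
            (by omega) hrunS hstopS rfl
          push_cast at this
          rw [this]
        · have hh : (decide (Ln ≤ k) && pvWin board color y0 x0 L dy dx (k - Ln)) = true :=
            hhead.trans hC
          rw [if_pos (by simp), hh, Bool.true_or, if_pos rfl]
      · have hcondF : ¬((k : Int) ≥ L - 1) := by omega
        rw [if_neg hcondF]
        have hheadF : (decide (Ln ≤ k) && pvWin board color y0 x0 L dy dx (k - Ln)) = false := by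
          simp [hk]
        rw [hheadF, Bool.false_or]
        have hnum1 : (if pvBGet board (y0 + dy * (k : Int)) (x0 + dx * (k : Int)) == color
              then num + 1 else num)
            = (((List.range' (k + 1 - min (k + 1) Ln) (min (k + 1) Ln)).countP p : Nat) : Int) := by
          have hmin1 : min (k + 1) Ln = k + 1 := by omega
          have hmin0 : min k Ln = k := by omega
          have hpk : p k = (pvBGet board (y0 + dy * (k : Int)) (x0 + dx * (k : Int)) == color) := by
            simp [hp, pvCell]
          have hsplit : List.range' 0 (k + 1) = List.range' 0 k ++ [k] := by
            rw [List.range'_concat]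
            congr 2
            omega
          rw [hmin1, Nat.sub_self, hsplit, List.countP_append]
          cases hc : pvBGet board (y0 + dy * (k : Int)) (x0 + dx * (k : Int)) == color <;>
            · rw [hnum]
              simp only [hmin0, Nat.sub_self, List.countP_cons, List.countP_nil, hpk, hc]
              push_cast
              omega
        rw [hnum1]
        have := ih r (k + 1)
          (((List.range' (k + 1 - min (k + 1) Ln) (min (k + 1) Ln)).countP p : Nat) : Int)
          (by omega) hrunS hstopS rfl
        push_cast at this
        rw [this]


theorem pvCollect_eq (board : List (List Int)) (y0 x0 dy dx : Int) :
    ∀ (f r k : Nat), r < f →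
    (∀ j, j < r → pvP y0 x0 dy dx ((k + j : Nat) : Int) = true) →
    pvP y0 x0 dy dx ((k + r : Nat) : Int) = false →
    pvCollect board y0 x0 dy dx f (k : Int)
      = (List.range' k r).map (fun (j : Nat) => pvCell board y0 x0 dy dx (j : Int)) := by
  intro f
  induction f with
  | zero => intro r k h; omega
  | succ f ih =>
    intro r k hrf hrun hstop
    match r with
    | 0 =>
      have h0 : pvInBox (y0 + dy * (k : Int)) (x0 + dx * (k : Int)) = false := by
        simpa [pvP] using hstop
      simp [pvCollect, h0]
    | r + 1 =>
      have hPk : pvInBox (y0 + dy * (k : Int)) (x0 + dx * (k : Int)) = true := by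
        simpa [pvP] using hrun 0 (by omega)
      have hrec := ih r (k + 1) (by omega)
        (fun j hj => by
          have := hrun (j + 1) (by omega)
          simpa [Nat.add_assoc, Nat.add_comm 1 j] using this)
        (by
          have := hstop
          simpa [Nat.add_assoc, Nat.add_comm 1 r] using this)
      simp only [pvCollect, hPk, if_true]
      rw [List.range'_succ]
      push_cast at hrec ⊢
      rw [hrec]
      simp [pvCell]

theorem pvBFind_eq (board : List (List Int)) (color y0 x0 L dy dx : Int) (hL : 1 ≤ L)
    (r : Nat)
    (hrun : ∀ j, j < r → pvP y0 x0 dy dx (j : Int) = true)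
    (hstop : pvP y0 x0 dy dx (r : Int) = false) :
    pvBFind ((List.range' 0 r).map (fun (j : Nat) => pvCell board y0 x0 dy dx (j : Int)))
        (pvP y0 x0 dy dx (-1) && (pvCell board y0 x0 dy dx (-1) == color)) (r : Int) color L
      = (List.range' 0 r).any (fun e =>
          decide ((L - 1).toNat ≤ e) && pvWin board color y0 x0 L dy dx (e - (L - 1).toNat)) := by
  set Ln := (L - 1).toNat with hLndef
  have hLn : ((Ln : Nat) : Int) = L - 1 := by omega
  have hLt : L.toNat = Ln + 1 := by omega
  set f : Nat → Int := fun (j : Nat) => pvCell board y0 x0 dy dx (j : Int) with hf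
  set cells := (List.range' 0 r).map f with hcells
  have hgetD : ∀ (j : Nat), j < r → PySem.List.pyGetD cells ((j : Nat) : Int) 0 = f j := by
    intro j hj
    rw [PySem.List.pyGetD_natCast, hcells]
    simp [List.getD_eq_getElem?_getD, hj]
  have hbody : ∀ (a : Nat), a + L.toNat ≤ r →
      ((PySem.List.slice cells (some ((a : Nat) : Int)) (some (((a : Nat) : Int) + L))).all
          (fun c => c == color)
       && (if 0 < ((a : Nat) : Int) then
             !(PySem.List.pyGetD cells (((a : Nat) : Int) - 1) 0 == color)
           else !(pvP y0 x0 dy dx (-1) && (pvCell board y0 x0 dy dx (-1) == color)))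
       && (decide ((r : Int) ≤ ((a : Nat) : Int) + L)
           || !(PySem.List.pyGetD cells (((a : Nat) : Int) + L) 0 == color)))
      = pvWin board color y0 x0 L dy dx a := by
    intro a haL
    have hslice : PySem.List.slice cells (some ((a : Nat) : Int)) (some (((a : Nat) : Int) + L))
        = (List.range' a L.toNat).map f := by
      have h1 : (((a : Nat) : Int) + L) = ((a + L.toNat : Nat) : Int) := by omega
      rw [h1, PySem.List.slice_natCast]
      have hsplit1 : List.range' 0 r
          = List.range' 0 a ++ List.range' a (L.toNat + (r - a - L.toNat)) := by
        rw [show List.range' a (L.toNat + (r - a - L.toNat))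
              = List.range' (0 + a) (L.toNat + (r - a - L.toNat)) by simp,
          List.range'_append_1]
        congr 1
        omega
      have hsplit2 : List.range' a (L.toNat + (r - a - L.toNat))
          = List.range' a L.toNat ++ List.range' (a + L.toNat) (r - a - L.toNat) :=
        List.range'_append_1.symm
      rw [hcells, hsplit1, List.map_append, List.drop_left' (by simp),
        hsplit2, List.map_append, show a + L.toNat - a = L.toNat by omega,
        List.take_left' (by simp)]
    rw [hslice, pvWin]
    have hall : ((List.range' a L.toNat).map f).all (fun c => c == color)
        = (List.range' a L.toNat).all
            (fun (j : Nat) => pvCell board y0 x0 dy dx (j : Int) == color) := by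
      rw [List.all_map]
      rfl
    rw [hall]
    congr 1
    · congr 1
      cases a with
      | zero => norm_num
      | succ a' =>
        have h0 : (0 : Int) < ((a' + 1 : Nat) : Int) := by push_cast; omega
        rw [if_pos h0]
        have hm1 : (((a' + 1 : Nat) : Int) - 1) = ((a' : Nat) : Int) := by push_cast; omega
        have hP : pvP y0 x0 dy dx ((a' : Nat) : Int) = true := hrun a' (by omega)
        rw [hm1, hgetD a' (by omega), hP]
        simp [hf]
    · by_cases hend : a + L.toNat = r
      · have h2 : (((a : Nat) : Int) + L) = ((r : Nat) : Int) := by omega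
        rw [h2, hstop]
        simp
      · have hlt : a + L.toNat < r := by omega
        have h2 : (((a : Nat) : Int) + L) = ((a + L.toNat : Nat) : Int) := by omega
        rw [h2, hrun _ hlt, hgetD _ hlt]
        have hd : ¬ ((r : Int) ≤ ((a + L.toNat : Nat) : Int)) := by omega
        have hdec : decide ((r : Int) ≤ ((a + L.toNat : Nat) : Int)) = false := by
          simp only [decide_eq_false_iff_not]
          exact hd
        simp only [hdec, Bool.false_or, Bool.true_and, hf]
  apply Bool.coe_iff_coe.mp
  simp only [pvBFind, List.any_eq_true]
  constructor
  · rintro ⟨i, hi, hb⟩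
    rw [PySem.List.mem_pyRange_one] at hi
    obtain ⟨hi0, hiu⟩ := hi
    have ha : i = ((i.toNat : Nat) : Int) := by omega
    set a := i.toNat with hadef
    have haL : a + L.toNat ≤ r := by omega
    refine ⟨a + Ln, ?_, ?_⟩
    · rw [List.mem_range'_1]
      omega
    · rw [ha] at hb
      rw [hbody a haL] at hb
      simp only [Nat.add_sub_cancel, hb, Bool.and_true, decide_eq_true_eq]
      omega
  · rintro ⟨e, he, hb⟩
    rw [List.mem_range'_1] at he
    rw [Bool.and_eq_true, decide_eq_true_eq] at hb
    obtain ⟨hLe, hwin⟩ := hb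
    set a := e - Ln with hadef
    have hae : e = a + Ln := by omega
    have haL : a + L.toNat ≤ r := by omega
    refine ⟨((a : Nat) : Int), ?_, ?_⟩
    · rw [PySem.List.mem_pyRange_one]
      constructor
      · omega
      · omega
    · rw [hbody a haL]
      exact hwin

theorem pvInBox_false (y x : Int) (h : ¬(8 > y ∧ y > -1 ∧ 8 > x ∧ x > -1)) :
    pvInBox y x = false := by
  simp only [pvInBox, Bool.and_eq_false_iff, decide_eq_false_iff_not]
  tauto

-- ===== VERDICT (by name: the statement is the Claim_ definition above) =====
theorem detect_row_for_win_spec : Claim_equal_detect_row_for_win := by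
  intro board color ys xs L dy dx hdom hpre
  unfold Spec_detect_row_for_win
  by_cases hbox : (-1 < ys ∧ ys < 8 ∧ -1 < xs ∧ xs < 8)
  · obtain ⟨hL, hd, -, -⟩ := hpre hbox
    have hstop16 : pvP ys xs dy dx ((16 : Nat) : Int) = false := by
      apply pvInBox_false
      rcases not_and_or.mp hd with hdy | hdx
      · intro hcon
        omega
      · intro hcon
        omega
    have hex : ∃ n : Nat, pvP ys xs dy dx (n : Int) = false := ⟨16, hstop16⟩
    have hstop : pvP ys xs dy dx ((Nat.find hex : Nat) : Int) = false := Nat.find_spec hex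
    have hrun : ∀ j, j < Nat.find hex → pvP ys xs dy dx (j : Int) = true := by
      intro j hj
      have := Nat.find_min hex hj
      revert this
      cases pvP ys xs dy dx (j : Int) <;> simp
    have hr : Nat.find hex < 17 := by
      have := Nat.find_min' hex hstop16
      omega
    have hA := pvALoop_eq board color ys xs L dy dx hL 17 (Nat.find hex) 0 0 hr
      (by simpa using hrun) (by simpa using hstop) (by simp)
    have hC := pvCollect_eq board ys xs dy dx 17 (Nat.find hex) 0 hr
      (by simpa using hrun) (by simpa using hstop)
    have hP0 : pvP ys xs dy dx ((0 : Nat) : Int) = true := by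
      simp only [pvP, Nat.cast_zero, mul_zero, add_zero, pvInBox,
        Bool.and_eq_true, decide_eq_true_eq]
      omega
    have hr0 : Nat.find hex ≠ 0 := by
      intro h0
      rw [h0] at hstop
      rw [hP0] at hstop
      simp at hstop
    unfold detect_row_for_win detect_row_for_win_alt
    rw [if_neg (by omega : ¬ L < 1)]
    simp only [Nat.cast_zero] at hA hC
    rw [hC]
    rw [if_neg (by
      simp only [List.isEmpty_iff, List.map_eq_nil_iff]
      intro hnil
      have hlen0 := congrArg List.length hnil
      simp only [List.length_range', List.length_nil] at hlen0
      exact hr0 hlen0)]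
    have hprev : (pvInBox (ys - dy) (xs - dx) && (pvBGet board (ys - dy) (xs - dx) == color))
        = (pvP ys xs dy dx (-1) && (pvCell board ys xs dy dx (-1) == color)) := by
      have ey : ys - dy = ys + dy * (-1) := by ring
      have ex : xs - dx = xs + dx * (-1) := by ring
      simp only [pvP, pvCell, ← ey, ← ex]
    rw [hprev]
    have hlen : PySem.List.len ((List.range' 0 (Nat.find hex)).map
        (fun (j : Nat) => pvCell board ys xs dy dx (j : Int))) = ((Nat.find hex : Nat) : Int) := by
      simp [PySem.List.len_eq]
    rw [hA]
    simp only [hlen, pvBFind_eq board color ys xs L dy dx hL (Nat.find hex) hrun hstop]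
  · have hbF : pvInBox ys xs = false := by
      apply pvInBox_false
      intro hcon
      exact hbox (by omega)
    unfold detect_row_for_win detect_row_for_win_alt
    rw [show (17 : Nat) = 16 + 1 from rfl]
    have hA0 : pvALoop board color ys xs L dy dx (16 + 1) 0 0 = 0 := by
      simp [pvALoop, mul_zero, add_zero, hbF]
    have hC0 : pvCollect board ys xs dy dx (16 + 1) 0 = [] := by
      simp [pvCollect, mul_zero, add_zero, hbF]
    rw [hA0]
    by_cases hL1 : L < 1
    · rw [if_pos hL1]
    · rw [if_neg hL1]
      simp only [hC0]
      simp
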